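-- pv_equiv track=rewrite | github.com/IAmNotAndrey/Algorithms_course_2 | Level_strategy.py | fill_task_on_graph
-- ===== SOURCE A (Python) =====
-- def remove_duplicate(first_list_link: list, second_list: list):
--     """Удаляет из первого списка те элементы, которые есть во втором"""
--
--     i = 0
--     while i < len(first_list_link):
--         if first_list_link[i] in second_list:
--             del first_list_link[i]
--         else:
--             i += 1
--
-- def fill_task_on_graph(relations: dict, roots: list) -> list:
--     """Создаёт список вершин (работ) по уровневой стратегии начиная с корней"""
--
--     # Добавляем корни в начало списка
--     task_list = [*roots]
--
--     while True:
--         new_roots = []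
--
--         for root in roots:
--             if root in relations.keys():
--                 # Получаем список связей текущей вершины
--                 temp_new_roots = [*relations.get(root)]
--
--                 # Удаляем те вершины, которые уже есть в списке новых вершин (иначе в основу может добавиться AA, BB...
--                 # вместо одной A, B)
--                 remove_duplicate(temp_new_roots, new_roots)
--
--                 # Добавляем полученные точки в список новых вершин
--                 new_roots = [*new_roots, *temp_new_roots]
--
--         if len(new_roots) == 0:
--             break
--
--         # Удаляем те вершины, которые уже есть в списке (иначе к A в основе может добавиться ещё одна A)
--         remove_duplicate(new_roots, task_list)
--
--         # Добавляем вершины в основной список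
--         task_list = [*task_list, *new_roots]
--
--         # Обновляем список корней
--         roots = new_roots
--
--     return task_list
-- ===== SOURCE B (Python) =====
-- def fill_task_on_graph(relations: dict, roots: list) -> list:
--     """Single-pass BFS over a growing queue with an O(1) 'seen' set,
--     instead of A's level-by-level rebuilds with quadratic list scans."""
--     task_list = list(roots)
--     seen = set(roots)
--     queue = list(roots)
--     i = 0
--     while i < len(queue):
--         children = relations.get(queue[i])
--         i += 1
--         if children is None:
--             continue
--         new = [c for c in children if c not in seen]
--         seen.update(new)
--         task_list.extend(new)
--         queue.extend(new)
--     return task_list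
-- ===== Notes on version B (the rewrite author's own statement) =====
-- stated objective: faster
-- what changed: Replaced A's level-by-level frontier rebuilding (with quadratic 'in'-list scans and a mutating remove_duplicate helper) by a single-pass BFS over a growing queue with an O(1)-membership 'seen' set.
import Mathlib
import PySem

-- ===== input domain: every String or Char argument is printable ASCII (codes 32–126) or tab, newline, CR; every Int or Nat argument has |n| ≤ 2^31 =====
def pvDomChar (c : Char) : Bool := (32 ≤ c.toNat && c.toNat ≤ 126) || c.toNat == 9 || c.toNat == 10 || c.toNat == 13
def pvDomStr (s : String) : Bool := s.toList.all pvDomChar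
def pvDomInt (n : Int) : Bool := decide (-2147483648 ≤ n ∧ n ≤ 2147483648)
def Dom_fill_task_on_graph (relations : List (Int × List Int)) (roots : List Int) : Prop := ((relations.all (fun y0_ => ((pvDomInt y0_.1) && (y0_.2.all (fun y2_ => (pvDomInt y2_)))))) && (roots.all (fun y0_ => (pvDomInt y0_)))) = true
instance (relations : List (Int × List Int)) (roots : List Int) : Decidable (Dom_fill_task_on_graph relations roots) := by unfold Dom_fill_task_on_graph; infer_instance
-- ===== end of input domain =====

-- B replaces A's level-by-level rebuilding with quadratic list-membership scans by a single-pass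
-- BFS queue with a 'seen' set; return values are proved identical (neither program mutates its arguments).

-- ===== PORT A =====

-- helper: Python's remove_duplicate(first, second). The while/del loop either deletes the current
-- element (= drop the head and rescan the rest) or advances i (= keep the head); structurally that
-- is this recursion on the list.
def removeDuplicate (first : List Int) (second : List Int) : List Int :=
  match first with
  | [] => []
  | x :: xs =>
    if second.contains x then removeDuplicate xs second
    else x :: removeDuplicate xs second

-- the 'for root in roots:' loop of A, accumulating new_roots
def levelStep (relations : List (Int × List Int)) : List Int → List Int → List Int
  | [], newRoots => newRoots
  | r :: rs, newRoots =>
    match (PySem.Dict.mk relations).get? r with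
    | some children => levelStep relations rs (newRoots ++ removeDuplicate children newRoots)
    | none => levelStep relations rs newRoots

-- termination measure helpers (used by both ports' decreasing_by; proofs-only, never change values)
def pvVals (relations : List (Int × List Int)) : List Int := relations.flatMap Prod.snd

def pvMissing (relations : List (Int × List Int)) (covered : List Int) : Nat :=
  ((pvVals relations).toFinset \ covered.toFinset).card

theorem pvMissing_le (relations : List (Int × List Int)) {s s' : List Int}
    (hsub : ∀ c, c ∈ s → c ∈ s') : pvMissing relations s' ≤ pvMissing relations s := by
  apply Finset.card_le_card
  intro a ha
  simp only [Finset.mem_sdiff, List.mem_toFinset] at *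
  exact ⟨ha.1, fun h => ha.2 (hsub a h)⟩

theorem pvMissing_lt (relations : List (Int × List Int)) {s s' : List Int} {x : Int}
    (hsub : ∀ c, c ∈ s → c ∈ s') (hx : x ∈ pvVals relations) (hxs : x ∉ s) (hxs' : x ∈ s') :
    pvMissing relations s' < pvMissing relations s := by
  apply Finset.card_lt_card
  rw [Finset.ssubset_iff_of_subset]
  · exact ⟨x, by simp only [Finset.mem_sdiff, List.mem_toFinset]; tauto,
      by simp only [Finset.mem_sdiff, List.mem_toFinset]; tauto⟩
  · intro a ha
    simp only [Finset.mem_sdiff, List.mem_toFinset] at *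
    exact ⟨ha.1, fun h => ha.2 (hsub a h)⟩

theorem removeDuplicate_eq_filter (first second : List Int) :
    removeDuplicate first second = first.filter (fun x => !(second.contains x)) := by
  induction first with
  | nil => rfl
  | cons x xs ih =>
    simp only [removeDuplicate, List.filter_cons]
    by_cases h : second.contains x <;> simp [ih]

theorem mem_removeDuplicate {x : Int} (first second : List Int) :
    x ∈ removeDuplicate first second ↔ x ∈ first ∧ x ∉ second := by
  simp [removeDuplicate_eq_filter, List.mem_filter]

theorem get?_mem_pvVals {relations : List (Int × List Int)} {r : Int} {children : List Int}
    (h : (PySem.Dict.mk relations).get? r = some children) :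
    ∀ c, c ∈ children → c ∈ pvVals relations := by
  induction relations with
  | nil => simp [PySem.Dict.get?] at h
  | cons p rest ih =>
    rw [show PySem.Dict.mk (p :: rest) = PySem.Dict.mk ((p.1, p.2) :: rest) by rfl,
      PySem.Dict.get?_mk_cons] at h
    intro c hc
    simp only [pvVals, List.flatMap_cons, List.mem_append]
    by_cases hp : (p.1 == r) = true
    · simp only [hp, if_pos] at h
      injection h with h'
      exact Or.inl (by rw [h']; exact hc)
    · simp only [hp, if_neg, Bool.false_eq_true, not_false_iff] at h
      exact Or.inr (by simpa [pvVals] using ih h c hc)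

theorem mem_levelStep {relations : List (Int × List Int)} {x : Int} :
    ∀ (rs acc : List Int), x ∈ levelStep relations rs acc → x ∈ acc ∨ x ∈ pvVals relations := by
  intro rs
  induction rs with
  | nil => intro acc h; exact Or.inl h
  | cons r rs ih =>
    intro acc h
    simp only [levelStep] at h
    cases hv : (PySem.Dict.mk relations).get? r with
    | none => rw [hv] at h; exact ih acc h
    | some children =>
      rw [hv] at h
      rcases ih _ h with h' | h'
      · rcases List.mem_append.1 h' with h'' | h''
        · exact Or.inl h''
        · exact Or.inr (get?_mem_pvVals hv x ((mem_removeDuplicate _ _).1 h'').1)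
      · exact Or.inr h'

-- the 'while True:' loop of A
def levelLoop (relations : List (Int × List Int)) (taskList roots : List Int) : List Int :=
  let newRoots := levelStep relations roots []
  if h : newRoots = [] then taskList
  else
    let nr := removeDuplicate newRoots taskList
    levelLoop relations (taskList ++ nr) nr
termination_by (pvMissing relations taskList, roots.length)
decreasing_by
  by_cases hnr : removeDuplicate (levelStep relations roots []) taskList = []
  · apply Prod.Lex.right'
    · exact pvMissing_le relations (fun c hc => List.mem_append_left _ hc)
    · rw [hnr]
      have hroots : roots ≠ [] := by
        intro hr
        apply h
        show levelStep relations roots [] = []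
        rw [hr]
        simp [levelStep]
      simpa using List.length_pos_of_ne_nil hroots
  · apply Prod.Lex.left
    obtain ⟨x, hx⟩ := List.exists_mem_of_ne_nil _ hnr
    have hx' := (mem_removeDuplicate _ _).1 hx
    have hxv : x ∈ pvVals relations := by
      rcases mem_levelStep _ _ hx'.1 with h' | h'
      · simp at h'
      · exact h'
    exact pvMissing_lt relations (fun c hc => List.mem_append_left _ hc) hxv hx'.2
      (List.mem_append_right _ hx)

def fill_task_on_graph (relations : List (Int × List Int)) (roots : List Int) : List Int :=
  levelLoop relations roots roots

-- ===== PORT B =====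

-- the 'while i < len(queue):' loop of B; pending is queue[i:]
def bfsLoop (relations : List (Int × List Int)) (taskList : List Int) (seen : PySem.Set Int)
    (pending : List Int) : List Int :=
  match pending with
  | [] => taskList
  | v :: rest =>
    match hv : (PySem.Dict.mk relations).get? v with
    | none => bfsLoop relations taskList seen rest
    | some children =>
      let nw := children.filter (fun c => !(PySem.Set.contains seen c))
      bfsLoop relations (taskList ++ nw) (PySem.Set.update seen nw) (rest ++ nw)
termination_by (pvMissing relations seen, pending.length)
decreasing_by
  · apply Prod.Lex.right
    simp
  · by_cases hnw : children.filter (fun c => !(PySem.Set.contains seen c)) = []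
    · apply Prod.Lex.right'
      · rw [hnw, PySem.Set.update_nil]
      · rw [hnw]; simp
    · apply Prod.Lex.left
      obtain ⟨x, hx⟩ := List.exists_mem_of_ne_nil _ hnw
      have hx' := List.mem_filter.1 hx
      have hxseen : x ∉ seen := by
        have := hx'.2
        simpa [PySem.Set.contains_eq_listContains, List.contains_iff_mem] using this
      exact pvMissing_lt relations
        (fun c hc => (PySem.Set.mem_update seen _ c).2 (Or.inl hc))
        (get?_mem_pvVals hv x hx'.1) hxseen
        ((PySem.Set.mem_update seen _ x).2 (Or.inr hx))

def fill_task_on_graph_alt (relations : List (Int × List Int)) (roots : List Int) : List Int :=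
  bfsLoop relations roots (PySem.Set.ofList roots) roots

-- ===== PRECONDITION & SPEC =====
def Spec_fill_task_on_graph (relations : List (Int × List Int)) (roots : List Int) (out : List Int) : Prop := out = fill_task_on_graph_alt relations roots
instance (relations : List (Int × List Int)) (roots : List Int) (out : List Int) : Decidable (Spec_fill_task_on_graph relations roots out) := by unfold Spec_fill_task_on_graph; infer_instance

-- ===== CLAIM (what is proved, stated in full; the proofs are below) =====
def Claim_equal_fill_task_on_graph : Prop := ∀ (relations : List (Int × List Int)) (roots : List Int), Dom_fill_task_on_graph relations roots → Spec_fill_task_on_graph relations roots (fill_task_on_graph relations roots)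

-- ===== LEMMAS AND PROOFS =====

theorem removeDuplicate_append (a b second : List Int) :
    removeDuplicate (a ++ b) second = removeDuplicate a second ++ removeDuplicate b second := by
  simp [removeDuplicate_eq_filter]

-- the queue loop of B consumes one whole level F of A: starting from task list S ++ (N minus S)
-- it reaches task list S ++ (N' minus S) with N' = levelStep F N, with exactly that left to process.
theorem bfs_level (relations : List (Int × List Int)) (S : List Int) :
    ∀ (F N : List Int) (seen : PySem.Set Int),
      (∀ c : Int, c ∈ seen ↔ c ∈ S ∨ (c ∈ N ∧ c ∉ S)) →
      ∃ seen' : PySem.Set Int,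
        (∀ c : Int, c ∈ seen' ↔ c ∈ S ∨ (c ∈ levelStep relations F N ∧ c ∉ S)) ∧
        bfsLoop relations (S ++ removeDuplicate N S) seen (F ++ removeDuplicate N S) =
          bfsLoop relations (S ++ removeDuplicate (levelStep relations F N) S) seen'
            (removeDuplicate (levelStep relations F N) S) := by
  intro F
  induction F with
  | nil =>
    intro N seen hseen
    exact ⟨seen, hseen, by simp [levelStep]⟩
  | cons v F' ih =>
    intro N seen hseen
    cases hv : (PySem.Dict.mk relations).get? v with
    | none =>
      have hstep : levelStep relations (v :: F') N = levelStep relations F' N := by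
        simp [levelStep, hv]
      have hbfs : bfsLoop relations (S ++ removeDuplicate N S) seen
          ((v :: F') ++ removeDuplicate N S) =
          bfsLoop relations (S ++ removeDuplicate N S) seen (F' ++ removeDuplicate N S) := by
        rw [List.cons_append, bfsLoop, hv]
      rw [hstep, hbfs]
      exact ih N seen hseen
    | some children =>
      -- B's filter against 'seen' equals A's two-stage dedup (against N, then against S)
      have hnw : children.filter (fun c => !(PySem.Set.contains seen c)) =
          removeDuplicate (removeDuplicate children N) S := by
        rw [removeDuplicate_eq_filter, removeDuplicate_eq_filter, List.filter_filter]
        apply List.filter_congr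
        intro c _
        have := hseen c
        by_cases h1 : c ∈ S <;> by_cases h2 : c ∈ N <;>
          simp [PySem.Set.contains_eq_listContains, *]
      have hstep : levelStep relations (v :: F') N =
          levelStep relations F' (N ++ removeDuplicate children N) := by
        simp [levelStep, hv]
      have hbfs : bfsLoop relations (S ++ removeDuplicate N S) seen
          ((v :: F') ++ removeDuplicate N S) =
          bfsLoop relations (S ++ removeDuplicate (N ++ removeDuplicate children N) S)
            (PySem.Set.update seen (removeDuplicate (removeDuplicate children N) S))
            (F' ++ removeDuplicate (N ++ removeDuplicate children N) S) := by
        rw [List.cons_append, bfsLoop, hv]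
        simp only [hnw, removeDuplicate_append, List.append_assoc]
      rw [hstep, hbfs]
      apply ih
      intro c
      rw [PySem.Set.mem_update]
      have h1 := hseen c
      have h2 := mem_removeDuplicate (x := c) (removeDuplicate children N) S
      have h3 := mem_removeDuplicate (x := c) children N
      have h4 : c ∈ N ++ removeDuplicate children N ↔ c ∈ N ∨ (c ∈ children ∧ c ∉ N) := by
        rw [List.mem_append, h3]
      rw [h4]
      tauto

theorem level_eq_bfs (relations : List (Int × List Int)) :
    ∀ (taskList F : List Int) (seen : PySem.Set Int),
      (∀ c : Int, c ∈ seen ↔ c ∈ taskList) →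
      levelLoop relations taskList F = bfsLoop relations taskList seen F := by
  intro taskList F
  fun_induction levelLoop relations taskList F with
  | case1 taskList F newRoots hnil =>
    intro seen hseen
    -- level produced nothing: A returns taskList; B's queue is exactly F and dies out the same way
    obtain ⟨seen', _, hb⟩ := bfs_level relations taskList F [] seen (by simpa using hseen)
    simp only [removeDuplicate, List.append_nil] at hb
    rw [hb]
    have hnil' : levelStep relations F [] = ([] : List Int) := hnil
    rw [hnil']
    simp [removeDuplicate, bfsLoop]
  | case2 taskList F newRoots hnil nr ih =>
    intro seen hseen
    obtain ⟨seen', hseen', hb⟩ := bfs_level relations taskList F [] seen (by simpa using hseen)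
    simp only [removeDuplicate, List.append_nil] at hb
    rw [hb]
    apply ih
    intro c
    rw [hseen' c, List.mem_append, mem_removeDuplicate]

-- ===== VERDICT (by name: the statement is the Claim_ definition above) =====
theorem fill_task_on_graph_spec : Claim_equal_fill_task_on_graph := by
  intro relations roots _
  unfold Spec_fill_task_on_graph fill_task_on_graph fill_task_on_graph_alt
  exact level_eq_bfs relations roots roots (PySem.Set.ofList roots)
    (fun c => PySem.Set.mem_ofList roots c)
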